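-- pv_equiv track=rewrite | github.com/jyh4479/Daily_Algorithm | Past_questions/T_coding_test_2.py | print_num
-- ===== SOURCE A (Python) =====
-- def print_num(visit,check_list):
--     ans_list=["X" for _ in range(len(check_list[0]))]
--     for i in range(len(visit)):
--         if visit[i]==True:
--             for j in range(len(check_list[i])):
--                 if ans_list[j]=="X" and check_list[i][j]=="O":
--                     ans_list[j]="O"
--     if "X" in ans_list:
--         return False
--     return True
-- ===== SOURCE B (Python) =====
-- def print_num(visit, check_list):
--     cols = len(check_list[0])
--     return all(
--         any(visit[i] == True and j < len(check_list[i]) and check_list[i][j] == "O"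
--             for i in range(len(visit)))
--         for j in range(cols))
-- ===== Notes on version B (the rewrite author's own statement) =====
-- stated objective: simpler
-- what changed: Replaces the mutable ans_list accumulator (mark columns row-major, then scan for a leftover "X") with a direct column-major boolean test: every column has some visited row showing "O".
import Mathlib
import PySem

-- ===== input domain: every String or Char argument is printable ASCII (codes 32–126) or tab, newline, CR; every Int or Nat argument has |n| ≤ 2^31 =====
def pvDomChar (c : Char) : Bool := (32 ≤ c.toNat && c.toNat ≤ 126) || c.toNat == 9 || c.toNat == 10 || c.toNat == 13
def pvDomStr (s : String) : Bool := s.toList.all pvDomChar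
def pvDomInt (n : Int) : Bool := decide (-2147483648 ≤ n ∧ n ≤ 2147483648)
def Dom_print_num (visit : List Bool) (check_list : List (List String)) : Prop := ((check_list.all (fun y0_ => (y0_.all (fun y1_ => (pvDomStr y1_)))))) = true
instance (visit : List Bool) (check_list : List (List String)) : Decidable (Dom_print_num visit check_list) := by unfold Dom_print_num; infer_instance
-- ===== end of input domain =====

-- B replaces A's mutable ans_list accumulator with a direct column-major all/any test (simpler decomposition, same cost).

-- ===== PORT A =====
def print_num (visit : List Bool) (check_list : List (List String)) : Bool :=
  let ans_list := (List.range (check_list.getD 0 []).length).map (fun _ => "X")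
  let ans := (List.range visit.length).foldl (fun ans i =>
    if visit.getD i false == true then
      (List.range (check_list.getD i []).length).foldl (fun a j =>
        if a.getD j "" == "X" && (check_list.getD i []).getD j "" == "O" then a.set j "O" else a) ans
    else ans) ans_list
  if "X" ∈ ans then false else true

-- ===== PORT B =====
def print_num_alt (visit : List Bool) (check_list : List (List String)) : Bool :=
  (List.range (check_list.getD 0 []).length).all (fun j =>
    (List.range visit.length).any (fun i =>
      visit.getD i false && decide (j < (check_list.getD i []).length) &&
        ((check_list.getD i []).getD j "" == "O")))

-- ===== PRECONDITION & SPEC =====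
-- Pre_ excludes exactly the inputs where the Python A raises IndexError: an empty check_list
-- (check_list[0] fails) and any visited row index i that is out of range or whose row is
-- longer than row 0 (ans_list[j] fails).
def Pre_print_num (visit : List Bool) (check_list : List (List String)) : Prop :=
  check_list ≠ [] ∧ ∀ i < visit.length, visit.getD i false = true →
    i < check_list.length ∧ (check_list.getD i []).length ≤ (check_list.getD 0 []).length
instance (visit : List Bool) (check_list : List (List String)) : Decidable (Pre_print_num visit check_list) := by unfold Pre_print_num; infer_instance
def pvWitness_print_num : List Bool × List (List String) := ([true, false], [["O", "X"], ["X"]])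
def Spec_print_num (visit : List Bool) (check_list : List (List String)) (out : Bool) : Prop := out = print_num_alt visit check_list
instance (visit : List Bool) (check_list : List (List String)) (out : Bool) : Decidable (Spec_print_num visit check_list out) := by unfold Spec_print_num; infer_instance

-- ===== CLAIM (what is proved, stated in full; the proofs are below) =====
def Claim_equal_print_num : Prop := ∀ (visit : List Bool) (check_list : List (List String)), Dom_print_num visit check_list → Pre_print_num visit check_list → Spec_print_num visit check_list (print_num visit check_list)

-- ===== LEMMAS AND PROOFS =====

-- coverage of column j by the first m rows, exactly B's inner `any`
def pvCov (visit : List Bool) (check_list : List (List String)) (m j : ℕ) : Bool :=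
  (List.range m).any (fun i =>
    visit.getD i false && decide (j < (check_list.getD i []).length) &&
      ((check_list.getD i []).getD j "" == "O"))

-- B, unfolded, is the all over pvCov
lemma pv_alt_eq (visit : List Bool) (check_list : List (List String)) :
    print_num_alt visit check_list =
      (List.range (check_list.getD 0 []).length).all
        (fun j => pvCov visit check_list visit.length j) := rfl

-- rewriting the bound in the guard of an if whose truth value is unchanged
lemma pv_if_shift {P : Prop} [Decidable P] {a b : String} {m j m' : ℕ} (h : (j < m) ↔ (j < m')) :
    (if j < m ∧ P then a else b) = (if j < m' ∧ P then a else b) :=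
  if_congr (and_congr_left fun _ => h) rfl rfl

-- characterisation of A's inner loop over one row
lemma pv_inner_spec (row : List String) (m : ℕ) : ∀ (ans : List String), m ≤ ans.length →
    (((List.range m).foldl (fun a j =>
        if a.getD j "" == "X" && row.getD j "" == "O" then a.set j "O" else a) ans).length
      = ans.length) ∧
    ∀ j, ((List.range m).foldl (fun a j =>
        if a.getD j "" == "X" && row.getD j "" == "O" then a.set j "O" else a) ans)[j]?.getD ""
      = if j < m ∧ ans[j]?.getD "" = "X" ∧ row[j]?.getD "" = "O" then "O"
        else ans[j]?.getD "" := by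
  induction m with
  | zero => intro ans _; simp
  | succ m ih =>
    intro ans hm
    have hm' : m ≤ ans.length := Nat.le_of_succ_le hm
    obtain ⟨hlen, hget⟩ := ih ans hm'
    rw [List.range_succ, List.foldl_append]
    set a' := (List.range m).foldl (fun a j =>
        if a.getD j "" == "X" && row.getD j "" == "O" then a.set j "O" else a) ans with ha'
    simp only [List.foldl_cons, List.foldl_nil]
    have hma : m < a'.length := by omega
    have ham : a'[m]?.getD "" = ans[m]?.getD "" := by
      rw [hget m]; simp
    by_cases hcond : ans[m]?.getD "" = "X" ∧ row[m]?.getD "" = "O"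
    · have hc1 : (a'.getD m "" == "X" && row.getD m "" == "O") = true := by
        simp only [List.getD_eq_getElem?_getD, Bool.and_eq_true, beq_iff_eq]
        exact ⟨ham.trans hcond.1, hcond.2⟩
      rw [if_pos hc1]
      refine ⟨by simp [hlen], fun j => ?_⟩
      by_cases hj : j = m
      · subst hj
        rw [List.getElem?_set_self hma]
        rw [if_pos ⟨Nat.lt_succ_self j, hcond⟩]
        rfl
      · rw [List.getElem?_set_ne (fun h => hj h.symm), hget j]
        by_cases hjm : j < m
        · exact pv_if_shift (by omega)
        · exact pv_if_shift (by omega)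
    · have hc0 : ¬ (a'.getD m "" == "X" && row.getD m "" == "O") = true := by
        simp only [List.getD_eq_getElem?_getD, Bool.and_eq_true, beq_iff_eq, not_and, ham]
        intro h1 h2
        exact hcond ⟨h1, h2⟩
      rw [if_neg hc0]
      refine ⟨hlen, fun j => ?_⟩
      rw [hget j]
      by_cases hjm : j < m
      · exact pv_if_shift (by omega)
      · by_cases hj : j = m
        · subst hj
          rw [if_neg (fun h => absurd h.1 hjm), if_neg (fun h => hcond ⟨h.2.1, h.2.2⟩)]
        · exact pv_if_shift (by omega)

-- one unrolling of B's `any`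
lemma pv_cov_succ (visit : List Bool) (check_list : List (List String)) (m j : ℕ) :
    pvCov visit check_list (m+1) j =
      (pvCov visit check_list m j ||
        (visit[m]?.getD false && decide (j < (check_list[m]?.getD []).length) &&
          ((check_list[m]?.getD [])[j]?.getD "" == "O"))) := by
  simp [pvCov, List.range_succ]

-- characterisation of A's outer loop
lemma pv_outer_spec (visit : List Bool) (check_list : List (List String)) (m : ℕ)
    (hm : m ≤ visit.length)
    (hpre : ∀ i < visit.length, visit[i]?.getD false = true →
      (check_list[i]?.getD []).length ≤ (check_list[0]?.getD []).length) :
    (((List.range m).foldl (fun ans i =>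
        if visit.getD i false == true then
          (List.range (check_list.getD i []).length).foldl (fun a j =>
            if a.getD j "" == "X" && (check_list.getD i []).getD j "" == "O" then a.set j "O" else a) ans
        else ans)
        ((List.range (check_list.getD 0 []).length).map (fun _ => "X"))).length
      = (check_list.getD 0 []).length) ∧
    ∀ j < (check_list.getD 0 []).length,
      ((List.range m).foldl (fun ans i =>
        if visit.getD i false == true then
          (List.range (check_list.getD i []).length).foldl (fun a j =>
            if a.getD j "" == "X" && (check_list.getD i []).getD j "" == "O" then a.set j "O" else a) ans
        else ans)
        ((List.range (check_list.getD 0 []).length).map (fun _ => "X")))[j]?.getD ""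
      = if pvCov visit check_list m j then "O" else "X" := by
  induction m with
  | zero =>
    refine ⟨by simp, fun j hj => ?_⟩
    simp only [List.getD_eq_getElem?_getD] at hj
    simp [pvCov, List.getElem?_replicate, hj]
  | succ m ih =>
    have hm' : m ≤ visit.length := Nat.le_of_succ_le hm
    obtain ⟨hlen, hget⟩ := ih hm'
    rw [List.range_succ, List.foldl_append]
    set A := (List.range m).foldl (fun ans i =>
        if visit.getD i false == true then
          (List.range (check_list.getD i []).length).foldl (fun a j =>
            if a.getD j "" == "X" && (check_list.getD i []).getD j "" == "O" then a.set j "O" else a) ans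
        else ans)
        ((List.range (check_list.getD 0 []).length).map (fun _ => "X")) with hA
    simp only [List.foldl_cons, List.foldl_nil]
    by_cases hv : visit[m]?.getD false = true
    · have hc1 : (visit.getD m false == true) = true := by
        simp only [List.getD_eq_getElem?_getD, beq_iff_eq]
        exact hv
      rw [if_pos hc1]
      have hrow : (check_list[m]?.getD []).length ≤ (check_list[0]?.getD []).length :=
        hpre m (by omega) hv
      have hlen' : A.length = (check_list[0]?.getD []).length := by
        simpa only [List.getD_eq_getElem?_getD] using hlen
      have hmle : (check_list.getD m []).length ≤ A.length := by
        simp only [List.getD_eq_getElem?_getD]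
        omega
      obtain ⟨hlen2, hget2⟩ := pv_inner_spec (check_list.getD m [])
        (check_list.getD m []).length A hmle
      refine ⟨by rw [hlen2, hlen], fun j hj => ?_⟩
      rw [hget2 j, hget j hj, pv_cov_succ]
      by_cases hcov : pvCov visit check_list m j = true
      · simp [hcov]
      · simp only [List.getD_eq_getElem?_getD]
        by_cases hjr : j < (check_list[m]?.getD []).length
        · by_cases hro : (check_list[m]?.getD [])[j]?.getD "" = "O"
          · simp [hcov, hjr, hro, hv]
          · simp [hcov, hjr, hro, hv]
        · simp [hcov, hjr, hv]
    · have hc0 : ¬ (visit.getD m false == true) = true := by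
        simp only [List.getD_eq_getElem?_getD, beq_iff_eq]
        exact hv
      rw [if_neg hc0]
      refine ⟨hlen, fun j hj => ?_⟩
      rw [hget j hj, pv_cov_succ]
      simp only [Bool.not_eq_true] at hv
      simp [hv]

-- ===== VERDICT (by name: the statement is the Claim_ definition above) =====
theorem print_num_spec : Claim_equal_print_num := by
  unfold Claim_equal_print_num
  intro visit check_list _ hpre
  unfold Spec_print_num
  obtain ⟨hne, hpre2⟩ := hpre
  obtain ⟨hlen, hget⟩ := pv_outer_spec visit check_list visit.length le_rfl
    (fun i hi hv => by
      simpa only [List.getD_eq_getElem?_getD] using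
        (hpre2 i hi (by simpa only [List.getD_eq_getElem?_getD] using hv)).2)
  rw [pv_alt_eq]
  have hPA : print_num visit check_list =
      (if "X" ∈ (List.range visit.length).foldl (fun ans i =>
          if visit.getD i false == true then
            (List.range (check_list.getD i []).length).foldl (fun a j =>
              if a.getD j "" == "X" && (check_list.getD i []).getD j "" == "O" then a.set j "O" else a) ans
          else ans)
          ((List.range (check_list.getD 0 []).length).map (fun _ => "X"))
        then false else true) := rfl
  rw [hPA]
  set A := (List.range visit.length).foldl (fun ans i =>
      if visit.getD i false == true then
        (List.range (check_list.getD i []).length).foldl (fun a j =>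
          if a.getD j "" == "X" && (check_list.getD i []).getD j "" == "O" then a.set j "O" else a) ans
      else ans)
      ((List.range (check_list.getD 0 []).length).map (fun _ => "X")) with hA
  by_cases hall : ∀ j < (check_list.getD 0 []).length, pvCov visit check_list visit.length j = true
  · have hmem : "X" ∉ A := by
      intro hx
      obtain ⟨k, hk, hkx⟩ := List.mem_iff_getElem.mp hx
      have hk' : k < (check_list.getD 0 []).length := hlen ▸ hk
      have h1 := hget k hk'
      rw [List.getElem?_eq_getElem hk] at h1
      rw [hall k hk'] at h1
      simp only [Option.getD_some, if_pos rfl] at h1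
      rw [hkx] at h1
      exact absurd h1 (by decide)
    rw [if_neg hmem]
    symm
    rw [List.all_eq_true]
    intro j hj
    exact hall j (List.mem_range.mp hj)
  · rw [not_forall] at hall
    obtain ⟨j, hj⟩ := hall
    rw [_root_.not_imp] at hj
    obtain ⟨hj, hcov⟩ := hj
    have hcov' : pvCov visit check_list visit.length j = false := by
      simpa only [Bool.not_eq_true] using hcov
    have hjA : j < A.length := hlen ▸ hj
    have hmem : "X" ∈ A := by
      have h1 := hget j hj
      rw [hcov'] at h1
      simp only [Bool.false_eq_true, if_false] at h1
      rw [List.getElem?_eq_getElem hjA] at h1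
      simp only [Option.getD_some] at h1
      exact h1 ▸ List.getElem_mem hjA
    rw [if_pos hmem]
    symm
    rw [List.all_eq_false]
    exact ⟨j, List.mem_range.mpr hj, by simp [hcov']⟩
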